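-- pv_equiv track=rewrite | github.com/qwl2333/leetcode-py3 | Companies/Amazon/OA/min_cost_to_purchase_m_items.py | min_cost_to_purchase_m_items
-- ===== SOURCE A (Python) =====
-- from queue import PriorityQueue
--
-- def min_cost_to_purchase_m_items(a: list[int], b: list[int], m: int) -> int:
--     pq = PriorityQueue()
--     n = len(a)
--     for i in range(n):
--         pq.put((a[i], (1, a[i], b[i])))
--
--     res = 0
--     for i in range(m):
--         cost, (seq, a_v, b_v) = pq.get()
--         res += cost
--         new_cost = a_v + seq * b_v
--         pq.put((new_cost, (seq + 1, a_v, b_v)))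
--
--     return res
-- ===== SOURCE B (Python) =====
-- def _key(s):
--     c, av, bv = s
--     return (av + c * bv, c + 1, av, bv)
--
--
-- def min_cost_to_purchase_m_items(a: list[int], b: list[int], m: int) -> int:
--     shops = [[0, av, bv] for av, bv in zip(a, b)]  # [purchases so far, first cost, step]
--     res = 0
--     for _ in range(m):
--         j = 0
--         for i in range(1, len(shops)):
--             if _key(shops[i]) < _key(shops[j]):
--                 j = i
--         c, av, bv = shops[j]
--         res += av + c * bv
--         shops[j][0] = c + 1
--     return res
-- ===== Notes on version B (the rewrite author's own statement) =====
-- stated objective: simpler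
-- what changed: B drops the lazily-refilled PriorityQueue entirely: it keeps one purchase counter per shop and, for each of the m purchases, picks the cheapest next purchase with a plain linear scan over the shops (same tuple tie-order as A's queue entries).
import Mathlib
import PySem

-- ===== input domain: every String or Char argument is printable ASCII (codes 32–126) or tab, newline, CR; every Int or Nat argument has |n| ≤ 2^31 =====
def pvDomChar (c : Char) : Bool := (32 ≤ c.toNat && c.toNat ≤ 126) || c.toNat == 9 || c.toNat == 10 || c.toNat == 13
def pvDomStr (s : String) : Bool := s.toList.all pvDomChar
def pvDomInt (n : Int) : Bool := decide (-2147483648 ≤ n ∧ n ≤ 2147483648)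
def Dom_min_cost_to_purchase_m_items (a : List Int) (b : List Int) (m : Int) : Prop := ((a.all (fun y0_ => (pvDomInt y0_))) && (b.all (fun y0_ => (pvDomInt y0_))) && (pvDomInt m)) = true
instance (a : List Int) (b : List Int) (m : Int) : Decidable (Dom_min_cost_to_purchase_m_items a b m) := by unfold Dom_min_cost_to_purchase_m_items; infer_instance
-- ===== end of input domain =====

-- B replaces A's lazily-refilled PriorityQueue by per-shop purchase counters with a linear
-- min() scan per purchase: simpler (no queue, no module import), same results.

-- ===== PORT A =====
-- A queue entry mirrors Python's (cost, (seq, a_v, b_v)) : Int × (Int × Int × Int).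
-- Python compares these tuples lexicographically; pqLe/pqLt are that order.
def pqLe (x y : Int × Int × Int × Int) : Bool :=
  decide (x.1 < y.1) || (x.1 == y.1 && (decide (x.2.1 < y.2.1) || (x.2.1 == y.2.1 &&
    (decide (x.2.2.1 < y.2.2.1) || (x.2.2.1 == y.2.2.1 && decide (x.2.2.2 ≤ y.2.2.2))))))

-- queue.PriorityQueue over int tuples, ported as a list kept sorted by the tuple order:
-- put = insert before the first entry it is ≤, get = take the head. Exact for
-- PriorityQueue's semantics (get returns the least entry; equal entries are identical tuples).
def pqPut (x : Int × Int × Int × Int) : List (Int × Int × Int × Int) → List (Int × Int × Int × Int)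
  | [] => [x]
  | h :: t => if pqLe x h then x :: h :: t else h :: pqPut x t

-- new_cost = a_v + seq * b_v; the re-queued entry (new_cost, (seq + 1, a_v, b_v))
def pqNext (k : Int × Int × Int × Int) : Int × Int × Int × Int :=
  (k.2.2.1 + k.2.1 * k.2.2.2, k.2.1 + 1, k.2.2.1, k.2.2.2)

-- 'for i in range(m): cost, (seq, a_v, b_v) = pq.get(); res += cost; pq.put(...)';
-- pq.get() on an empty queue BLOCKS forever in Python — Pre_ keeps that unreachable.
def loopA : Nat → List (Int × Int × Int × Int) → Int → Int
  | 0, _, res => res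
  | _ + 1, [], res => res
  | t + 1, k :: rest, res => loopA t (pqPut (pqNext k) rest) (res + k.1)

def min_cost_to_purchase_m_items (a : List Int) (b : List Int) (m : Int) : Int :=
  let n : Int := (a.length : Int)
  let pq := (PySem.List.pyRange 0 n 1).foldl
    (fun pq i => pqPut (PySem.List.pyGetD a i 0, 1, PySem.List.pyGetD a i 0, PySem.List.pyGetD b i 0) pq) []
  loopA m.toNat pq 0

-- ===== PORT B =====
-- strict tuple comparison _key(shops[i]) < _key(shops[j])
def pqLt (x y : Int × Int × Int × Int) : Bool :=
  decide (x.1 < y.1) || (x.1 == y.1 && (decide (x.2.1 < y.2.1) || (x.2.1 == y.2.1 &&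
    (decide (x.2.2.1 < y.2.2.1) || (x.2.2.1 == y.2.2.1 && decide (x.2.2.2 < y.2.2.2))))))

-- _key([c, av, bv]) = (av + c * bv, c + 1, av, bv)
def shopKey (s : Int × Int × Int) : Int × Int × Int × Int :=
  (s.2.1 + s.1 * s.2.2, s.1 + 1, s.2.1, s.2.2)

-- one pass of 'for _ in range(m)': inner 'for i in range(1, len(shops))' argmin scan,
-- then res += av + c * bv and shops[j][0] = c + 1 (list update in place → List.set)
def loopB : Nat → List (Int × Int × Int) → Int → Int
  | 0, _, res => res
  | t + 1, shops, res =>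
    let j : Int := (PySem.List.pyRange 1 (shops.length : Int) 1).foldl
      (fun j i => if pqLt (shopKey (PySem.List.pyGetD shops i (0, 0, 0)))
                         (shopKey (PySem.List.pyGetD shops j (0, 0, 0))) then i else j) 0
    let s := PySem.List.pyGetD shops j (0, 0, 0)
    loopB t (shops.set j.toNat (s.1 + 1, s.2.1, s.2.2)) (res + (s.2.1 + s.1 * s.2.2))

def min_cost_to_purchase_m_items_alt (a : List Int) (b : List Int) (m : Int) : Int :=
  -- shops = [[0, av, bv] for av, bv in zip(a, b)]
  loopB m.toNat ((a.zip b).map (fun p => ((0 : Int), p.1, p.2))) 0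

-- ===== PRECONDITION & SPEC =====
-- Pre_ excludes exactly the inputs where A does not return: b shorter than a (b[i] raises
-- IndexError) and m > 0 with a empty (pq.get() blocks forever on the empty queue).
def Pre_min_cost_to_purchase_m_items (a : List Int) (b : List Int) (m : Int) : Prop :=
  a.length ≤ b.length ∧ (m ≤ 0 ∨ a ≠ [])
instance (a : List Int) (b : List Int) (m : Int) : Decidable (Pre_min_cost_to_purchase_m_items a b m) := by
  unfold Pre_min_cost_to_purchase_m_items; infer_instance

def pvWitness_min_cost_to_purchase_m_items : List Int × List Int × Int := ([1, 2], [3, 4], 3)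

def Spec_min_cost_to_purchase_m_items (a : List Int) (b : List Int) (m : Int) (out : Int) : Prop := out = min_cost_to_purchase_m_items_alt a b m
instance (a : List Int) (b : List Int) (m : Int) (out : Int) : Decidable (Spec_min_cost_to_purchase_m_items a b m out) := by unfold Spec_min_cost_to_purchase_m_items; infer_instance

-- ===== CLAIM (what is proved, stated in full; the proofs are below) =====
def Claim_equal_min_cost_to_purchase_m_items : Prop := ∀ (a : List Int) (b : List Int) (m : Int), Dom_min_cost_to_purchase_m_items a b m → Pre_min_cost_to_purchase_m_items a b m → Spec_min_cost_to_purchase_m_items a b m (min_cost_to_purchase_m_items a b m)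

-- ===== LEMMAS AND PROOFS =====

theorem pqLe_refl (x : Int × Int × Int × Int) : pqLe x x = true := by
  simp [pqLe]

theorem pqLe_total (x y : Int × Int × Int × Int) : pqLe x y = true ∨ pqLe y x = true := by
  simp only [pqLe, Bool.or_eq_true, Bool.and_eq_true, decide_eq_true_eq, beq_iff_eq]
  omega

theorem pqLe_trans {x y z : Int × Int × Int × Int} (h1 : pqLe x y = true) (h2 : pqLe y z = true) :
    pqLe x z = true := by
  simp only [pqLe, Bool.or_eq_true, Bool.and_eq_true, decide_eq_true_eq, beq_iff_eq] at *
  omega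

theorem pqLe_antisymm {x y : Int × Int × Int × Int} (h1 : pqLe x y = true) (h2 : pqLe y x = true) :
    x = y := by
  obtain ⟨x1, x2, x3, x4⟩ := x
  obtain ⟨y1, y2, y3, y4⟩ := y
  simp only [pqLe, Bool.or_eq_true, Bool.and_eq_true, decide_eq_true_eq, beq_iff_eq] at *
  simp only [Prod.mk.injEq]
  omega

theorem pqLt_iff_not_le {x y : Int × Int × Int × Int} : pqLt x y = true ↔ ¬ pqLe y x = true := by
  simp only [pqLe, pqLt, Bool.or_eq_true, Bool.and_eq_true, decide_eq_true_eq, beq_iff_eq]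
  omega

theorem pqLt_le {x y : Int × Int × Int × Int} (h : pqLt x y = true) : pqLe x y = true := by
  rcases pqLe_total x y with h' | h'
  · exact h'
  · exact absurd h' (pqLt_iff_not_le.mp h)

theorem perm_pqPut (x : Int × Int × Int × Int) (l : List (Int × Int × Int × Int)) :
    (pqPut x l).Perm (x :: l) := by
  induction l with
  | nil => simp [pqPut]
  | cons h t ih =>
    by_cases hc : pqLe x h = true
    · simp [pqPut, hc]
    · simp only [pqPut, hc, Bool.false_eq_true, if_false]
      exact ((ih.cons h).trans (List.Perm.swap x h t))

theorem pairwise_pqPut (x : Int × Int × Int × Int) (l : List (Int × Int × Int × Int))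
    (hl : l.Pairwise (fun u v => pqLe u v = true)) :
    (pqPut x l).Pairwise (fun u v => pqLe u v = true) := by
  induction l with
  | nil => simp [pqPut]
  | cons h t ih =>
    rcases List.pairwise_cons.mp hl with ⟨hh, ht⟩
    by_cases hc : pqLe x h = true
    · simp only [pqPut, hc, if_true]
      refine List.pairwise_cons.mpr ⟨?_, hl⟩
      intro y hy
      rcases List.mem_cons.mp hy with rfl | hy
      · exact hc
      · exact pqLe_trans hc (hh y hy)
    · have hxh : pqLe h x = true := (pqLe_total x h).resolve_left (by simpa using hc)
      simp only [pqPut, hc, Bool.false_eq_true, if_false]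
      refine List.pairwise_cons.mpr ⟨?_, ih ht⟩
      intro y hy
      have := (perm_pqPut x t).mem_iff.mp hy
      rcases List.mem_cons.mp this with rfl | hy'
      · exact hxh
      · exact hh y hy'

theorem head_min {k : Int × Int × Int × Int} {rest : List (Int × Int × Int × Int)}
    (hs : (k :: rest).Pairwise (fun u v => pqLe u v = true)) {x : Int × Int × Int × Int}
    (hx : x ∈ k :: rest) : pqLe k x = true := by
  rcases List.mem_cons.mp hx with rfl | hx'
  · exact pqLe_refl x
  · exact (List.pairwise_cons.mp hs).1 x hx'

theorem foldl_pqPut_perm (g : Int → Int × Int × Int × Int) (l : List Int)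
    (acc : List (Int × Int × Int × Int)) :
    (l.foldl (fun pq i => pqPut (g i) pq) acc).Perm (acc ++ l.map g) := by
  induction l generalizing acc with
  | nil => simp
  | cons x t ih =>
    have h1 : (t.foldl (fun pq i => pqPut (g i) pq) (pqPut (g x) acc)).Perm
        (pqPut (g x) acc ++ t.map g) := ih _
    have h2 : (pqPut (g x) acc ++ t.map g).Perm ((g x :: acc) ++ t.map g) :=
      (perm_pqPut (g x) acc).append_right _
    have h3 : ((g x :: acc) ++ t.map g).Perm (acc ++ g x :: t.map g) :=
      (List.perm_middle (a := g x) (l₁ := acc) (l₂ := t.map g)).symm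
    exact (h1.trans h2).trans h3

theorem foldl_pqPut_pairwise (g : Int → Int × Int × Int × Int) (l : List Int)
    (acc : List (Int × Int × Int × Int))
    (hacc : acc.Pairwise (fun u v => pqLe u v = true)) :
    (l.foldl (fun pq i => pqPut (g i) pq) acc).Pairwise (fun u v => pqLe u v = true) := by
  induction l generalizing acc with
  | nil => exact hacc
  | cons x t ih => exact ih _ (pairwise_pqPut (g x) acc hacc)

-- the inner 'for i in range(c, n)' argmin scan: its result indexes a minimal key
theorem argmin_spec (f : Int → Int × Int × Int × Int) (n : Int) :
    ∀ (k : Nat) (c j : Int), (n - c).toNat = k → 1 ≤ c → c ≤ n → 0 ≤ j → j < c →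
    (∀ i, 0 ≤ i → i < c → pqLe (f j) (f i) = true) →
    (0 ≤ (PySem.List.pyRange c n 1).foldl (fun j i => if pqLt (f i) (f j) then i else j) j ∧
     (PySem.List.pyRange c n 1).foldl (fun j i => if pqLt (f i) (f j) then i else j) j < n ∧
     ∀ i, 0 ≤ i → i < n →
       pqLe (f ((PySem.List.pyRange c n 1).foldl (fun j i => if pqLt (f i) (f j) then i else j) j)) (f i) = true) := by
  intro k
  induction k with
  | zero =>
    intro c j hk hc1 hcn hj0 hjc hmin
    have hnc : n = c := by omega
    subst hnc
    rw [PySem.List.pyRange_one_eq_nil le_rfl]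
    exact ⟨hj0, hjc, hmin⟩
  | succ k ih =>
    intro c j hk hc1 hcn hj0 hjc hmin
    have hlt : c < n := by omega
    rw [PySem.List.pyRange_one_cons hlt]
    simp only [List.foldl_cons]
    by_cases hcj : pqLt (f c) (f j) = true
    · simp only [hcj, if_true]
      refine ih (c + 1) c (by omega) (by omega) (by omega) (by omega) (by omega) ?_
      intro i hi0 hic
      rcases lt_or_eq_of_le (by omega : i ≤ c) with hi | hi
      · exact pqLe_trans (pqLt_le hcj) (hmin i hi0 (by omega))
      · subst hi; exact pqLe_refl _
    · simp only [hcj, Bool.false_eq_true, if_false]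
      refine ih (c + 1) j (by omega) (by omega) (by omega) hj0 (by omega) ?_
      intro i hi0 hic
      rcases lt_or_eq_of_le (by omega : i ≤ c) with hi | hi
      · exact hmin i hi0 (by omega)
      · subst hi
        by_contra h
        exact hcj (pqLt_iff_not_le.mpr h)

theorem shopKey_advance (s : Int × Int × Int) :
    shopKey (s.1 + 1, s.2.1, s.2.2) = pqNext (shopKey s) := rfl

theorem loop_eq : ∀ (t : Nat) (pq : List (Int × Int × Int × Int))
    (shops : List (Int × Int × Int)) (res : Int), shops ≠ [] →
    pq.Pairwise (fun u v => pqLe u v = true) → pq.Perm (shops.map shopKey) →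
    loopA t pq res = loopB t shops res := by
  intro t
  induction t with
  | zero => intro pq shops res _ _ _; rfl
  | succ t ih =>
    intro pq shops res hne hsort hperm
    have hpos : 0 < shops.length := List.length_pos_of_ne_nil hne
    have hlen : pq.length = shops.length := by simpa using hperm.length_eq
    obtain ⟨k, rest, rfl⟩ : ∃ k rest, pq = k :: rest := by
      cases pq with
      | nil => simp at hlen; omega
      | cons k rest => exact ⟨k, rest, rfl⟩
    have h1n : (1 : Int) ≤ (shops.length : Int) := by exact_mod_cast hpos
    have hmin0 : ∀ i, 0 ≤ i → i < 1 →
        pqLe ((fun i => shopKey (PySem.List.pyGetD shops i ((0 : Int), (0 : Int), (0 : Int)))) 0)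
             ((fun i => shopKey (PySem.List.pyGetD shops i ((0 : Int), (0 : Int), (0 : Int)))) i) = true := by
      intro i h0 h1
      have hi : i = 0 := by omega
      subst hi; exact pqLe_refl _
    obtain ⟨hj0, hjn, hjmin⟩ :=
      argmin_spec (fun i => shopKey (PySem.List.pyGetD shops i ((0 : Int), (0 : Int), (0 : Int))))
        ((shops.length : Int)) (((shops.length : Int)) - 1).toNat 1 0 rfl le_rfl h1n le_rfl
        (by norm_num) hmin0
    set jj : Int := (PySem.List.pyRange 1 ((shops.length : Int)) 1).foldl
      (fun j i => if pqLt (shopKey (PySem.List.pyGetD shops i ((0 : Int), (0 : Int), (0 : Int))))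
                         (shopKey (PySem.List.pyGetD shops j ((0 : Int), (0 : Int), (0 : Int)))) then i else j) 0 with hjjdef
    have hj0' : 0 ≤ jj := hj0
    have hjn' : jj < (shops.length : Int) := hjn
    have hjmin' : ∀ i, 0 ≤ i → i < (shops.length : Int) →
        pqLe (shopKey (PySem.List.pyGetD shops jj ((0 : Int), (0 : Int), (0 : Int))))
             (shopKey (PySem.List.pyGetD shops i ((0 : Int), (0 : Int), (0 : Int)))) = true := hjmin
    have hjnat : jj.toNat < shops.length := by omega
    set ss := PySem.List.pyGetD shops jj ((0 : Int), (0 : Int), (0 : Int)) with hssdef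
    have hs : ss = shops[jj.toNat] := by
      rw [hssdef]
      exact PySem.List.pyGetD_eq_getElem _ _ hj0' (by exact_mod_cast hjn')
    -- k is exactly the key of the shop B selects
    have hfj_mem : shopKey ss ∈ shops.map shopKey := by
      rw [hs]; exact List.mem_map_of_mem (List.getElem_mem hjnat)
    have h1 : pqLe k (shopKey ss) = true := head_min hsort (hperm.mem_iff.mpr hfj_mem)
    have hk_mem : k ∈ shops.map shopKey := hperm.mem_iff.mp List.mem_cons_self
    have h2 : pqLe (shopKey ss) k = true := by
      obtain ⟨s', hs'mem, hs'⟩ := List.mem_map.mp hk_mem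
      obtain ⟨idx, hidx, hidxe⟩ := List.mem_iff_getElem.mp hs'mem
      have hfi : shopKey (PySem.List.pyGetD shops ((idx : Nat) : Int) ((0 : Int), (0 : Int), (0 : Int))) = k := by
        rw [PySem.List.pyGetD_eq_getElem _ _ (Int.natCast_nonneg idx) (by exact_mod_cast hidx)]
        simp only [Int.toNat_natCast]
        rw [hidxe, hs']
      rw [← hfi]
      exact hjmin' idx (Int.natCast_nonneg idx) (by exact_mod_cast hidx)
    have hkfj : k = shopKey ss := pqLe_antisymm h1 h2
    -- the tail of the queue matches the unselected shops
    have hjm : jj.toNat < (shops.map shopKey).length := by simpa using hjnat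
    have hperm2 : rest.Perm ((shops.map shopKey).eraseIdx jj.toNat) := by
      have h3 : ((shops.map shopKey)[jj.toNat] :: (shops.map shopKey).eraseIdx jj.toNat).Perm
          (shops.map shopKey) := List.getElem_cons_eraseIdx_perm hjm
      have hget : (shops.map shopKey)[jj.toNat] = shopKey ss := by
        rw [List.getElem_map, ← hs]
      have h4 := hperm.trans h3.symm
      rw [hget, ← hkfj] at h4
      exact h4.cons_inv
    have e1 : (shops.set jj.toNat (ss.1 + 1, ss.2.1, ss.2.2)).map shopKey
        = (shops.map shopKey).set jj.toNat (pqNext k) := by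
      rw [List.map_set, shopKey_advance, ← hkfj]
    have hnewperm : (pqPut (pqNext k) rest).Perm
        ((shops.set jj.toNat (ss.1 + 1, ss.2.1, ss.2.2)).map shopKey) := by
      rw [e1]
      have e2 : ((shops.map shopKey).set jj.toNat (pqNext k)).Perm
          (pqNext k :: (shops.map shopKey).eraseIdx jj.toNat) :=
        List.set_perm_cons_eraseIdx hjm _
      exact (perm_pqPut _ rest).trans ((hperm2.cons _).trans e2.symm)
    have hnewsort : (pqPut (pqNext k) rest).Pairwise (fun u v => pqLe u v = true) :=
      pairwise_pqPut _ rest (List.pairwise_cons.mp hsort).2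
    have hnewne : shops.set jj.toNat (ss.1 + 1, ss.2.1, ss.2.2) ≠ [] := by
      apply List.length_pos_iff_ne_nil.mp
      simpa using hpos
    have hres : k.1 = ss.2.1 + ss.1 * ss.2.2 := by rw [hkfj]; rfl
    show loopA t (pqPut (pqNext k) rest) (res + k.1)
      = loopB t (shops.set jj.toNat (ss.1 + 1, ss.2.1, ss.2.2)) (res + (ss.2.1 + ss.1 * ss.2.2))
    rw [hres]
    exact ih _ _ _ hnewne hnewsort hnewperm

theorem init_eq (a b : List Int) (hab : a.length ≤ b.length) :
    ((PySem.List.pyRange 0 (a.length : Int) 1).map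
      (fun i => ((PySem.List.pyGetD a i 0, 1, PySem.List.pyGetD a i 0, PySem.List.pyGetD b i 0) : Int × Int × Int × Int)))
    = ((a.zip b).map (fun p => ((0 : Int), p.1, p.2))).map shopKey := by
  apply List.ext_getElem
  · simp [PySem.List.length_pyRange_one]
    omega
  · intro i h1 h2
    have hia : i < a.length := by
      simpa [PySem.List.length_pyRange_one] using h1
    have hib : i < b.length := by omega
    simp only [List.getElem_map, PySem.List.getElem_pyRange_one, zero_add]
    rw [PySem.List.pyGetD_eq_getElem _ _ (Int.natCast_nonneg i) (by exact_mod_cast hia),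
        PySem.List.pyGetD_eq_getElem _ _ (Int.natCast_nonneg i) (by exact_mod_cast hib)]
    simp [List.getElem_zip, shopKey, Int.toNat_natCast]

-- ===== VERDICT (by name: the statement is the Claim_ definition above) =====
theorem min_cost_to_purchase_m_items_spec : Claim_equal_min_cost_to_purchase_m_items := by
  intro a b m _ hpre
  obtain ⟨hab, hm⟩ := hpre
  unfold Spec_min_cost_to_purchase_m_items min_cost_to_purchase_m_items min_cost_to_purchase_m_items_alt
  by_cases ha : a = []
  · have hm0 : m ≤ 0 := hm.resolve_right (by simp [ha])
    have : m.toNat = 0 := Int.toNat_of_nonpos hm0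
    simp only [this]
    rfl
  · have hne : ((a.zip b).map fun p => ((0 : Int), p.1, p.2)) ≠ [] := by
      simp only [ne_eq, List.map_eq_nil_iff, List.zip_eq_nil_iff, not_or]
      constructor
      · exact ha
      · intro hb
        apply ha
        have : a.length = 0 := by simpa [hb] using hab
        exact List.eq_nil_of_length_eq_zero this
    apply loop_eq
    · exact hne
    · exact foldl_pqPut_pairwise
        (fun i => ((PySem.List.pyGetD a i 0, 1, PySem.List.pyGetD a i 0,
          PySem.List.pyGetD b i 0) : Int × Int × Int × Int)) _ [] List.Pairwise.nil
    · have h0 := foldl_pqPut_perm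
        (fun i => ((PySem.List.pyGetD a i 0, 1, PySem.List.pyGetD a i 0,
          PySem.List.pyGetD b i 0) : Int × Int × Int × Int))
        (PySem.List.pyRange 0 ((a.length : Int)) 1) []
      rw [List.nil_append, init_eq a b hab] at h0
      exact h0
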